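-- pv_equiv track=rewrite | github.com/nakhlarafi/metric-calculation | get_method_info.py | get_method_text
-- ===== SOURCE A (Python) =====
-- def get_method_text(codelines, startpos, endpos, startline, endline, last_endline_index):
--     if startpos is None:
--         return "", None, None, None
--     else:
--         startline_index = startline - 1
--         endline_index = endline - 1 if endpos is not None else None
--
--         if last_endline_index is not None:
--             for line in codelines[(last_endline_index + 1):(startline_index)]:
--                 if "@" in line:
--                     startline_index = startline_index - 1
--         meth_text = "<ST>".join(codelines[startline_index:endline_index])
--         meth_text = meth_text[:meth_text.rfind("}") + 1]
--         brace_diff = abs(meth_text.count("}") - meth_text.count("{"))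
--
--         for _ in range(brace_diff):
--             meth_text  = meth_text[:meth_text.rfind("}")]
--             meth_text  = meth_text[:meth_text.rfind("}") + 1]
--
--         meth_lines = meth_text.split("<ST>")
--         meth_text  = "".join(meth_lines)
--         last_endline_index = startline_index + (len(meth_lines) - 1)
--
--         return meth_text, (startline_index + 1), (last_endline_index + 1), last_endline_index
-- ===== SOURCE B (Python) =====
-- def get_method_text(codelines, startpos, endpos, startline, endline, last_endline_index):
--     if startpos is None:
--         return "", None, None, None
--     startline_index = startline - 1
--     endline_index = endline - 1 if endpos is not None else None
--     if last_endline_index is not None: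
--         startline_index -= sum("@" in line for line in codelines[last_endline_index + 1:startline_index])
--     joined = "<ST>".join(codelines[startline_index:endline_index])
--     # one scan collects every '}' position; cut once at the balancing '}' instead of
--     # trimming with repeated rfind (empty when the braces run out)
--     pos = [i for i, c in enumerate(joined) if c == "}"]
--     k = len(pos)
--     if k == 0:
--         meth_text = ""
--     else:
--         opens = joined[:pos[-1]].count("{")
--         m = k - abs(k - opens)
--         meth_text = joined[:pos[m - 1] + 1] if m > 0 else ""
--     nlines = meth_text.count("<ST>") + 1
--     meth_text = meth_text.replace("<ST>", "")
--     last_endline_index = startline_index + (nlines - 1)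
--     return meth_text, startline_index + 1, last_endline_index + 1, last_endline_index
-- ===== Notes on version B (the rewrite author's own statement) =====
-- stated objective: alternative
-- what changed: A's repeated rfind-trim loop (brace_diff iterations, each rescanning the text with two rfind+slice passes) is replaced by one enumerate scan collecting all '}' positions plus a single slice at the balancing '}' (empty when braces run out), and the split('<ST>')/join('') epilogue is replaced by count('<ST>')+1 for the line bookkeeping and replace('<ST>','') for the text; the @-annotation loop becomes a sum over the slice.
import Mathlib
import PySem

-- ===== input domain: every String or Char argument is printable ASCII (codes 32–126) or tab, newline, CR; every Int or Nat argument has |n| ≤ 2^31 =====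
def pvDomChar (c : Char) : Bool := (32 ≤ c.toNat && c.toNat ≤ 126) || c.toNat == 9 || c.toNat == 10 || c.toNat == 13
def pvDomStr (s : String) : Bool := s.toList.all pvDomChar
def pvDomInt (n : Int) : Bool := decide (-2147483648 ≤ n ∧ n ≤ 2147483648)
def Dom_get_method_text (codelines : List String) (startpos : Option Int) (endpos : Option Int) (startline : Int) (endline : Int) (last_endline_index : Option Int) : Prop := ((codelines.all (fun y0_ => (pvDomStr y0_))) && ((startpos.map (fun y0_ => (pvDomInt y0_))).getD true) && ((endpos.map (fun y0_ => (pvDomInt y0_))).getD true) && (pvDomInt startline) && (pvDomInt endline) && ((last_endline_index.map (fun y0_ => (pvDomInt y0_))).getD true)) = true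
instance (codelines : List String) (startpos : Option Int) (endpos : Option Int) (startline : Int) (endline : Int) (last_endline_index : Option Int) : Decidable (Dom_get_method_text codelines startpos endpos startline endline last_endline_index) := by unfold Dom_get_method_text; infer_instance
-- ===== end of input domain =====

-- B replaces the rfind-trim loop by one scan for all '}' positions with a single balancing cut, and the split/join epilogue by count/replace (alternative decomposition; return value only, not claimed faster).


-- ===== PORT A =====
def get_method_text (codelines : List String) (startpos : Option Int) (endpos : Option Int) (startline : Int) (endline : Int) (last_endline_index : Option Int) : String × Option Int × Option Int × Option Int :=
  match startpos with
  | none => ("", none, none, none)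
  | some _ =>
    let startline_index : Int := startline - 1
    let endline_index : Option Int := if endpos.isSome then some (endline - 1) else none
    let startline_index : Int :=
      match last_endline_index with
      | none => startline_index
      | some lei =>
        (PySem.List.slice codelines (some (lei + 1)) (some startline_index)).foldl
          (fun si line => if PySem.Str.isIn "@" line then si - 1 else si) startline_index
    let meth_text : String := PySem.Str.join "<ST>" (PySem.List.slice codelines (some startline_index) endline_index)
    let meth_text : String := PySem.Str.slice meth_text none (some (PySem.Str.rfind meth_text "}" + 1))
    let brace_diff : Int := |(PySem.Str.count meth_text "}" : Int) - (PySem.Str.count meth_text "{" : Int)|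
    let meth_text : String :=
      (PySem.List.pyRange 0 brace_diff 1).foldl
        (fun t _ =>
          let t1 := PySem.Str.slice t none (some (PySem.Str.rfind t "}"))
          PySem.Str.slice t1 none (some (PySem.Str.rfind t1 "}" + 1)))
        meth_text
    let meth_lines : List String := (PySem.Str.split? meth_text "<ST>").getD []
    let meth_text : String := PySem.Str.join "" meth_lines
    let last_endline_index2 : Int := startline_index + ((meth_lines.length : Int) - 1)
    (meth_text, some (startline_index + 1), some (last_endline_index2 + 1), some last_endline_index2)

-- ===== PORT B =====
def get_method_text_alt (codelines : List String) (startpos : Option Int) (endpos : Option Int) (startline : Int) (endline : Int) (last_endline_index : Option Int) : String × Option Int × Option Int × Option Int :=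
  match startpos with
  | none => ("", none, none, none)
  | some _ =>
    let si0 : Int := startline - 1
    let ei : Option Int := if endpos.isSome then some (endline - 1) else none
    let si : Int :=
      match last_endline_index with
      | none => si0
      | some lei =>
        si0 - ((PySem.List.slice codelines (some (lei + 1)) (some si0)).countP
                 (fun line => PySem.Str.isIn "@" line) : Int)
    let joined : String := PySem.Str.join "<ST>" (PySem.List.slice codelines (some si) ei)
    let pos : List Int := ((PySem.List.enumerate joined.toList 0).filter (fun p => p.2 == '}')).map (·.1)
    let k : Int := pos.length
    let meth_text : String :=
      if k == 0 then ""
      else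
        let opens : Int := PySem.Str.count (PySem.Str.slice joined none (some (PySem.List.pyGetD pos (-1) 0))) "{"
        let m : Int := k - |k - opens|
        if 0 < m then PySem.Str.slice joined none (some (PySem.List.pyGetD pos (m - 1) 0 + 1)) else ""
    let nlines : Int := (PySem.Str.count meth_text "<ST>" : Int) + 1
    let text : String := PySem.Str.replace meth_text "<ST>" ""
    let lei2 : Int := si + (nlines - 1)
    (text, some (si + 1), some (lei2 + 1), some lei2)

-- ===== PRECONDITION & SPEC =====
def Spec_get_method_text (codelines : List String) (startpos : Option Int) (endpos : Option Int) (startline : Int) (endline : Int) (last_endline_index : Option Int) (out : String × Option Int × Option Int × Option Int) : Prop := out = get_method_text_alt codelines startpos endpos startline endline last_endline_index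
instance (codelines : List String) (startpos : Option Int) (endpos : Option Int) (startline : Int) (endline : Int) (last_endline_index : Option Int) (out : String × Option Int × Option Int × Option Int) : Decidable (Spec_get_method_text codelines startpos endpos startline endline last_endline_index out) := by unfold Spec_get_method_text; infer_instance

-- ===== CLAIM (what is proved, stated in full; the proofs are below) =====
def Claim_equal_get_method_text : Prop := ∀ (codelines : List String) (startpos : Option Int) (endpos : Option Int) (startline : Int) (endline : Int) (last_endline_index : Option Int), Dom_get_method_text codelines startpos endpos startline endline last_endline_index → Spec_get_method_text codelines startpos endpos startline endline last_endline_index (get_method_text codelines startpos endpos startline endline last_endline_index)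

-- ===== LEMMAS AND PROOFS =====

-- the prefix of v keeping its first k '}' characters (ending at the k-th '}'); [] for k = 0
def pvCutEnd : List Char → Nat → List Char
  | _, 0 => []
  | [], _+1 => []
  | c :: cs, k+1 => c :: pvCutEnd cs (if c = '}' then k else k+1)

-- the indices of all '}' characters of v, in increasing order
def pvPos : List Char → List Nat
  | [] => []
  | c :: cs => if c = '}' then 0 :: (pvPos cs).map (·+1) else (pvPos cs).map (·+1)

theorem pvCutEnd_nil (k : Nat) : pvCutEnd [] k = [] := by cases k <;> rfl

theorem pvCutEnd_zero (v : List Char) : pvCutEnd v 0 = [] := by cases v <;> rfl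

theorem pvPrefixSingle (c : Char) (l : List Char) (i : Nat) :
    ([c].isPrefixOf (l.drop i)) = true ↔ l[i]? = some c := by
  rw [List.isPrefixOf_iff_prefix, ← List.head?_drop]
  cases l.drop i with
  | nil => simp
  | cons d t => simp [List.cons_prefix_cons, eq_comm]

theorem pvRfindGo_notMem (v : List Char) (h : '}' ∉ v) (j : Nat) :
    PySem.Chars.rfind.go v ['}'] j = -1 := by
  induction j with
  | zero =>
    simp only [PySem.Chars.rfind.go]
    rcases hp : ['}'].isPrefixOf v with _ | _
    · simp [hp]
    · have : v[0]? = some '}' := (pvPrefixSingle '}' v 0).1 (by simpa using hp)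
      exact absurd (List.mem_of_getElem? this) h
  | succ j ih =>
    simp only [PySem.Chars.rfind.go]
    rcases hp : ['}'].isPrefixOf (v.drop (j+1)) with _ | _
    · simp [hp]; exact ih
    · have : v[j+1]? = some '}' := (pvPrefixSingle '}' v (j+1)).1 hp
      exact absurd (List.mem_of_getElem? this) h

theorem pvRfind_notMem (v : List Char) (h : '}' ∉ v) : PySem.Chars.rfind v ['}'] = -1 := by
  simp only [PySem.Chars.rfind]
  exact pvRfindGo_notMem v h v.length

theorem pvRfindGo_last (w rest : List Char) (h : '}' ∉ rest) :
    ∀ j, w.length ≤ j → PySem.Chars.rfind.go (w ++ '}' :: rest) ['}'] j = w.length := by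
  intro j
  induction j with
  | zero =>
    intro hj
    have hw : w = [] := List.eq_nil_of_length_eq_zero (Nat.le_zero.1 hj)
    subst hw
    simp [PySem.Chars.rfind.go, List.isPrefixOf]
  | succ j ih =>
    intro hj
    simp only [PySem.Chars.rfind.go]
    rcases Nat.lt_or_ge j w.length with hlt | hge
    · have hwl : w.length = j + 1 := by omega
      have hp : (['}'].isPrefixOf ((w ++ '}' :: rest).drop (j+1))) = true := by
        rw [pvPrefixSingle, ← hwl, List.getElem?_append_right (Nat.le_refl _)]
        simp
      rw [hp, if_pos rfl, hwl]
    · have hp : (['}'].isPrefixOf ((w ++ '}' :: rest).drop (j+1))) = false := by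
        rcases hb : ['}'].isPrefixOf ((w ++ '}' :: rest).drop (j+1)) with _ | _
        · rfl
        · exfalso
          have hgt : (w ++ '}' :: rest)[j+1]? = some '}' := (pvPrefixSingle _ _ _).1 hb
          rw [List.getElem?_append_right (by omega)] at hgt
          have h1 : j + 1 - w.length = (j - w.length) + 1 := by omega
          rw [h1, List.getElem?_cons_succ] at hgt
          exact h (List.mem_of_getElem? hgt)
      rw [hp]
      simp only [Bool.false_eq_true, if_false]
      exact ih hge

theorem pvRfind_last (w rest : List Char) (h : '}' ∉ rest) :
    PySem.Chars.rfind (w ++ '}' :: rest) ['}'] = w.length := by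
  simp only [PySem.Chars.rfind]
  exact pvRfindGo_last w rest h _ (by simp)

-- decompose a list at its LAST '}' occurrence
theorem pvSplitLast (v : List Char) (h : '}' ∈ v) :
    ∃ w rest, v = w ++ '}' :: rest ∧ '}' ∉ rest := by
  induction v with
  | nil => cases h
  | cons c cs ih =>
    by_cases hcs : '}' ∈ cs
    · obtain ⟨w, rest, rfl, hr⟩ := ih hcs
      exact ⟨c :: w, rest, rfl, hr⟩
    · have hc : c = '}' := by
        rcases List.mem_cons.1 h with h1 | h1
        · exact h1.symm
        · exact absurd h1 hcs
      exact ⟨[], cs, by simp [hc], hcs⟩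

theorem pvCutEnd_append (w rest : List Char) :
    ∀ m, m ≤ w.count '}' → pvCutEnd (w ++ rest) m = pvCutEnd w m := by
  induction w with
  | nil =>
    intro m hm
    simp only [List.count_nil, Nat.le_zero] at hm
    subst hm
    rw [pvCutEnd_zero, pvCutEnd_nil]
  | cons c cs ih =>
    intro m hm
    cases m with
    | zero => rw [pvCutEnd_zero, pvCutEnd_zero]
    | succ k =>
      simp only [List.cons_append, pvCutEnd]
      by_cases hc : c = '}'
      · have hk : k ≤ cs.count '}' := by simp [List.count_cons, hc] at hm; omega
        simp [hc, ih k hk]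
      · have hk : k + 1 ≤ cs.count '}' := by simp [List.count_cons, hc] at hm; omega
        simp [hc, ih (k+1) hk]

theorem pvCutEnd_nested (v : List Char) :
    ∀ k m, m ≤ k → pvCutEnd (pvCutEnd v k) m = pvCutEnd v m := by
  induction v with
  | nil => intro k m _; simp [pvCutEnd_nil]
  | cons c cs ih =>
    intro k m hm
    cases m with
    | zero => rw [pvCutEnd_zero, pvCutEnd_zero]
    | succ m' =>
      cases k with
      | zero => omega
      | succ k' =>
        simp only [pvCutEnd]
        by_cases hc : c = '}'
        · simp only [hc, if_pos, pvCutEnd]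
          rw [ih k' m' (by omega)]
        · simp only [if_neg hc, pvCutEnd, ih (k'+1) (m'+1) (by omega : m'+1 ≤ k'+1)]

theorem pvCutEnd_concat (v : List Char) :
    ∀ k, k + 1 ≤ v.count '}' → ∃ w, pvCutEnd v (k+1) = w ++ ['}'] ∧ w.count '}' = k := by
  induction v with
  | nil => intro k hk; simp at hk
  | cons c cs ih =>
    intro k hk
    by_cases hc : c = '}'
    · cases k with
      | zero =>
        refine ⟨[], ?_, by simp⟩
        simp [pvCutEnd, hc, pvCutEnd_zero]
      | succ k' =>
        have hcount : k' + 1 ≤ cs.count '}' := by simp [List.count_cons, hc] at hk; omega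
        obtain ⟨w', hw', hcw'⟩ := ih k' hcount
        refine ⟨'}' :: w', ?_, by simp [List.count_cons, hcw']⟩
        simp [pvCutEnd, hc, hw']
    · have hcount : k + 1 ≤ cs.count '}' := by simp [List.count_cons, hc] at hk; omega
      obtain ⟨w', hw', hcw'⟩ := ih k hcount
      refine ⟨c :: w', ?_, ?_⟩
      · simp [pvCutEnd, hc, hw']
      · simp [List.count_cons, hc, hcw']

theorem pvCutEnd_count (v : List Char) :
    ∀ k, k ≤ v.count '}' → (pvCutEnd v k).count '}' = k := by
  induction v with
  | nil => intro k hk; simp at hk; simp [hk, pvCutEnd_nil]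
  | cons c cs ih =>
    intro k hk
    cases k with
    | zero => rw [pvCutEnd_zero]; rfl
    | succ k' =>
      simp only [pvCutEnd]
      by_cases hc : c = '}'
      · have hk' : k' ≤ cs.count '}' := by simp [List.count_cons, hc] at hk; omega
        simp [List.count_cons, hc, ih k' hk']
      · have hk' : k' + 1 ≤ cs.count '}' := by simp [List.count_cons, hc] at hk; omega
        simp [List.count_cons, hc, ih _ hk']

theorem pvCutEnd_snoc (w : List Char) :
    pvCutEnd (w ++ ['}']) (w.count '}' + 1) = w ++ ['}'] := by
  induction w with
  | nil => decide
  | cons c cs ih =>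
    simp only [List.cons_append, pvCutEnd]
    by_cases hc : c = '}'
    · simp [List.count_cons, hc, ih]
    · simp [List.count_cons, hc, ih]

-- the first-trim v[:v.rfind('}')+1] keeps exactly all the '}'s of v
theorem pvTrim_eq (v : List Char) :
    PySem.Chars.slice v none (some (PySem.Chars.rfind v ['}'] + 1)) = pvCutEnd v (v.count '}') := by
  by_cases h : '}' ∈ v
  · obtain ⟨w, rest, rfl, hr⟩ := pvSplitLast v h
    rw [pvRfind_last w rest hr]
    rw [PySem.Chars.slice_eq_listSlice, PySem.List.slice_to _ (by omega)]
    have h1 : ((w.length : Int) + 1).toNat = w.length + 1 := by omega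
    have h2 : (w ++ '}' :: rest).take (w.length + 1) = w ++ ['}'] := by
      rw [List.take_append]; simp
    have h3 : (w ++ '}' :: rest).count '}' = w.count '}' + 1 := by
      rw [List.count_append, List.count_cons]
      simp [List.count_eq_zero.2 hr]
    have h4 : pvCutEnd (w ++ '}' :: rest) (w.count '}' + 1) = pvCutEnd (w ++ ['}']) (w.count '}' + 1) := by
      have hs : w ++ '}' :: rest = (w ++ ['}']) ++ rest := by simp
      rw [hs]
      exact pvCutEnd_append (w ++ ['}']) rest _ (by simp [List.count_append])
    rw [h1, h2, h3, h4, pvCutEnd_snoc]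
  · rw [pvRfind_notMem v h]
    rw [PySem.Chars.slice_eq_listSlice]
    norm_num
    rw [PySem.List.slice_to _ (by omega)]
    simp [List.count_eq_zero.2 h, pvCutEnd_zero]

-- one iteration of A's trimming loop, list level
def pvStepC (u : List Char) : List Char :=
  PySem.Chars.slice (PySem.Chars.slice u none (some (PySem.Chars.rfind u ['}'])))
    none (some (PySem.Chars.rfind (PySem.Chars.slice u none (some (PySem.Chars.rfind u ['}']))) ['}'] + 1))

theorem pvStep_cutEnd (v : List Char) (k : Nat) (hk : k ≤ v.count '}') :
    pvStepC (pvCutEnd v k) = pvCutEnd v (k - 1) := by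
  cases k with
  | zero => rw [pvCutEnd_zero]; decide
  | succ k' =>
    obtain ⟨w, hw, hcw⟩ := pvCutEnd_concat v k' hk
    rw [hw]
    unfold pvStepC
    have h1 : PySem.Chars.rfind (w ++ ['}']) ['}'] = w.length := pvRfind_last w [] (by simp)
    rw [h1]
    have h2 : PySem.Chars.slice (w ++ ['}']) none (some ((w.length : Nat) : Int)) = w := by
      rw [PySem.Chars.slice_eq_listSlice, PySem.List.slice_to _ (by omega)]
      simp
    rw [h2, pvTrim_eq w, hcw]
    have h3 : pvCutEnd w k' = pvCutEnd (w ++ ['}']) k' :=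
      (pvCutEnd_append w ['}'] k' (le_of_eq hcw.symm)).symm
    rw [Nat.succ_sub_one, h3, ← hw, pvCutEnd_nested v (k'+1) k' (by omega)]

theorem pvIter (v : List Char) (n : Nat) :
    pvStepC^[n] (pvCutEnd v (v.count '}')) = pvCutEnd v (v.count '}' - n) := by
  induction n with
  | zero => simp
  | succ n ih =>
    rw [Function.iterate_succ_apply', ih, pvStep_cutEnd v _ (Nat.sub_le _ _), Nat.sub_sub]

theorem pvFoldlConst {α β : Type} (l : List α) (f : β → β) (x : β) :
    l.foldl (fun t _ => f t) x = f^[l.length] x := by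
  induction l generalizing x with
  | nil => rfl
  | cons a l ih => rw [List.foldl_cons, List.length_cons, Function.iterate_succ_apply, ih]

theorem pvPos_eq (v : List Char) : ∀ (s : Int),
    ((PySem.List.enumerate v s).filter (fun p => p.2 == '}')).map (·.1)
      = (pvPos v).map (fun (i : Nat) => s + (i : Int)) := by
  induction v with
  | nil => intro s; simp [PySem.List.enumerate, pvPos]
  | cons c cs ih =>
    intro s
    rw [PySem.List.enumerate_cons, List.filter_cons]
    by_cases hc : c = '}'
    · simp only [hc, pvPos, if_pos rfl]
      simp only [show ((((s, '}') : Int × Char).2 == '}') = true) from rfl, if_pos]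
      rw [List.map_cons, ih (s+1), List.map_cons, List.map_map]
      congr 1
      · simp
      · exact List.map_congr_left (fun i _ => by simp only [Function.comp_apply]; push_cast; ring)
    · simp only [pvPos, if_neg hc]
      have hb : ((((s, c) : Int × Char).2 == '}') = false) := by simpa using hc
      rw [hb]
      simp only [Bool.false_eq_true, if_false]
      rw [ih (s+1), List.map_map]
      exact List.map_congr_left (fun i _ => by simp only [Function.comp_apply]; push_cast; ring)

theorem pvPos_length (v : List Char) : (pvPos v).length = v.count '}' := by
  induction v with
  | nil => rfl
  | cons c cs ih => by_cases hc : c = '}' <;> simp [pvPos, hc, ih, List.count_cons]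

theorem pvPos_take (v : List Char) : ∀ j (h : j < (pvPos v).length),
    v.take ((pvPos v)[j] + 1) = pvCutEnd v (j+1) := by
  induction v with
  | nil => intro j h; simp [pvPos] at h
  | cons c cs ih =>
    intro j h
    by_cases hc : c = '}'
    · cases j with
      | zero => simp [pvPos, hc, pvCutEnd, pvCutEnd_zero]
      | succ j' =>
        subst hc
        have hps : pvPos ('}' :: cs) = 0 :: (pvPos cs).map (·+1) := by simp [pvPos]
        rw [hps] at h
        simp only [hps]
        have hj' : j' < (pvPos cs).length := by simpa using h
        rw [List.getElem_cons_succ, List.getElem_map,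
          show (pvPos cs)[j'] + 1 + 1 = ((pvPos cs)[j'] + 1) + 1 from rfl, List.take_succ_cons,
          ih j' hj']
        simp [pvCutEnd]
    · simp only [pvPos, if_neg hc] at h ⊢
      rw [List.getElem_map]
      have hj : j < (pvPos cs).length := by simpa using h
      rw [show (pvPos cs)[j] + 1 + 1 = ((pvPos cs)[j] + 1) + 1 from rfl, List.take_succ_cons,
        ih j hj]
      simp [pvCutEnd, hc]

theorem pvPos_getElem (v : List Char) : ∀ j (h : j < (pvPos v).length),
    v[(pvPos v)[j]]? = some '}' := by
  induction v with
  | nil => intro j h; simp [pvPos] at h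
  | cons c cs ih =>
    intro j h
    by_cases hc : c = '}'
    · subst hc
      have hps : pvPos ('}' :: cs) = 0 :: (pvPos cs).map (·+1) := by simp [pvPos]
      rw [hps] at h
      simp only [hps]
      cases j with
      | zero => simp
      | succ j' =>
        have hj' : j' < (pvPos cs).length := by simpa using h
        rw [List.getElem_cons_succ, List.getElem_map, List.getElem?_cons_succ]
        exact ih j' hj'
    · simp only [pvPos, if_neg hc] at h ⊢
      have hj : j < (pvPos cs).length := by simpa using h
      rw [List.getElem_map, List.getElem?_cons_succ]
      exact ih j hj

-- count of '{' in the trimmed text equals count of '{' strictly before the last '}'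
theorem pvOpens (v : List Char) (h : 0 < (pvPos v).length) :
    (pvCutEnd v (v.count '}')).count '{'
      = (v.take ((pvPos v)[(pvPos v).length - 1])).count '{' := by
  have hlen : (pvPos v).length = v.count '}' := pvPos_length v
  have hj : (pvPos v).length - 1 < (pvPos v).length := by omega
  have htake := pvPos_take v ((pvPos v).length - 1) hj
  have hK : (pvPos v).length - 1 + 1 = v.count '}' := by omega
  rw [hK] at htake
  rw [← htake, List.take_succ]
  rw [pvPos_getElem v ((pvPos v).length - 1) hj]
  simp

theorem pvAdjEq (l : List String) (a : Int) :
    l.foldl (fun si line => if PySem.Str.isIn "@" line then si - 1 else si) a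
      = a - (l.countP (fun line => PySem.Str.isIn "@" line) : Int) := by
  induction l generalizing a with
  | nil => simp
  | cons x l ih =>
    rw [List.foldl_cons, List.countP_cons]
    cases hx : PySem.Str.isIn "@" x
    · simp only [hx, Bool.false_eq_true, if_false, ih a]
      push_cast
      ring
    · simp only [hx, if_true, ih (a-1)]
      push_cast
      ring

theorem pvStepS_ofList (l : List Char) :
    PySem.Str.slice (PySem.Str.slice (String.ofList l) none (some (PySem.Str.rfind (String.ofList l) "}"))) none
      (some (PySem.Str.rfind (PySem.Str.slice (String.ofList l) none (some (PySem.Str.rfind (String.ofList l) "}"))) "}" + 1))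
    = String.ofList (pvStepC l) := by
  simp only [PySem.Str.slice, PySem.Str.rfind, String.toList_ofList, pvStepC,
    show "}".toList = ['}'] from rfl]

theorem pvIterS (n : Nat) (l : List Char) :
    (fun t => PySem.Str.slice (PySem.Str.slice t none (some (PySem.Str.rfind t "}"))) none
      (some (PySem.Str.rfind (PySem.Str.slice t none (some (PySem.Str.rfind t "}"))) "}" + 1)))^[n]
      (String.ofList l)
    = String.ofList (pvStepC^[n] l) := by
  induction n generalizing l with
  | zero => rfl
  | succ n ih =>
    rw [Function.iterate_succ_apply, Function.iterate_succ_apply]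
    show (fun t => _)^[n] (PySem.Str.slice (PySem.Str.slice (String.ofList l) none (some (PySem.Str.rfind (String.ofList l) "}"))) none
      (some (PySem.Str.rfind (PySem.Str.slice (String.ofList l) none (some (PySem.Str.rfind (String.ofList l) "}"))) "}" + 1))) = _
    rw [pvStepS_ofList, ih]

-- count of a one-character needle is List.count
theorem pvCountGoAcc (sub : List Char) : ∀ (f : Nat) (l : List Char) (a : Nat),
    PySem.Chars.count.go sub f l a = a + PySem.Chars.count.go sub f l 0 := by
  intro f
  induction f with
  | zero => intro l a; simp [PySem.Chars.count.go]
  | succ f ih =>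
    intro l a
    cases l with
    | nil => simp [PySem.Chars.count.go]
    | cons c t =>
      simp only [PySem.Chars.count.go]
      by_cases hp : sub.isPrefixOf (c :: t) = true
      · rw [if_pos hp, if_pos hp, ih _ (a+1), ih _ 1]
        omega
      · rw [if_neg hp, if_neg hp, ih t a]

theorem pvCountGoSingle (c : Char) : ∀ (f : Nat) (l : List Char), l.length ≤ f →
    PySem.Chars.count.go [c] f l 0 = l.count c := by
  intro f
  induction f with
  | zero =>
    intro l hl
    have : l = [] := List.eq_nil_of_length_eq_zero (Nat.le_zero.1 hl)
    subst this; simp [PySem.Chars.count.go]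
  | succ f ih =>
    intro l hl
    cases l with
    | nil => simp [PySem.Chars.count.go]
    | cons d t =>
      simp only [PySem.Chars.count.go]
      have hpre : ([c].isPrefixOf (d :: t)) = (c == d) := by
        simp [List.isPrefixOf]
      by_cases hcd : c = d
      · have hp : ([c].isPrefixOf (d :: t)) = true := by simp [hpre, hcd]
        rw [if_pos hp]
        simp only [List.length_cons, List.length_nil, List.drop_succ_cons, List.drop_zero]
        rw [pvCountGoAcc, ih t (by simpa using hl), List.count_cons]
        simp [hcd, eq_comm]
        omega
      · have hp : ¬ (([c].isPrefixOf (d :: t)) = true) := by simp [hpre]; exact hcd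
        rw [if_neg hp, ih t (by simpa using hl), List.count_cons]
        simp [Ne.symm hcd]

theorem pvCountSingle (c : Char) (l : List Char) :
    PySem.Chars.count l [c] = l.count c := by
  rw [PySem.Chars.count, if_neg (by simp)]
  exact pvCountGoSingle c l.length l (le_refl _)

-- Python's xs[-1] on a nonempty list is the last element
theorem pvGetNegOne {α : Type} (xs : List α) (d : α) (h : 1 ≤ xs.length) :
    PySem.List.pyGetD xs (-1) d = (xs[xs.length - 1]?).getD d := by
  simp only [PySem.List.pyGetD, PySem.List.pyGet?, PySem.List.pyIdx?]
  rw [if_neg (by omega), if_pos (by omega)]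
  simp

-- A's trim+loop equals B's single cut at the balancing '}' (both as functions of the joined string)
set_option maxHeartbeats 1000000 in
theorem pvMidEq (mt : String) :
    (PySem.List.pyRange 0
        |(PySem.Str.count (PySem.Str.slice mt none (some (PySem.Str.rfind mt "}" + 1))) "}" : Int)
          - (PySem.Str.count (PySem.Str.slice mt none (some (PySem.Str.rfind mt "}" + 1))) "{" : Int)| 1).foldl
      (fun t _ => PySem.Str.slice (PySem.Str.slice t none (some (PySem.Str.rfind t "}"))) none
        (some (PySem.Str.rfind (PySem.Str.slice t none (some (PySem.Str.rfind t "}"))) "}" + 1)))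
      (PySem.Str.slice mt none (some (PySem.Str.rfind mt "}" + 1)))
    =
    (if (((((PySem.List.enumerate mt.toList 0).filter (fun p => p.2 == '}')).map (·.1)).length : Int) == 0) then ""
     else
       if 0 < ((((PySem.List.enumerate mt.toList 0).filter (fun p => p.2 == '}')).map (·.1)).length : Int)
           - |((((PySem.List.enumerate mt.toList 0).filter (fun p => p.2 == '}')).map (·.1)).length : Int)
              - (PySem.Str.count (PySem.Str.slice mt none (some (PySem.List.pyGetD ((((PySem.List.enumerate mt.toList 0).filter (fun p => p.2 == '}')).map (·.1))) (-1) 0))) "{" : Int)| then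
         PySem.Str.slice mt none
           (some (PySem.List.pyGetD ((((PySem.List.enumerate mt.toList 0).filter (fun p => p.2 == '}')).map (·.1)))
             (((((PySem.List.enumerate mt.toList 0).filter (fun p => p.2 == '}')).map (·.1)).length : Int)
               - |((((PySem.List.enumerate mt.toList 0).filter (fun p => p.2 == '}')).map (·.1)).length : Int)
                  - (PySem.Str.count (PySem.Str.slice mt none (some (PySem.List.pyGetD ((((PySem.List.enumerate mt.toList 0).filter (fun p => p.2 == '}')).map (·.1))) (-1) 0))) "{" : Int)| - 1) 0 + 1))
       else "") := by
  have hT : PySem.Str.slice mt none (some (PySem.Str.rfind mt "}" + 1))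
      = String.ofList (pvCutEnd mt.toList (mt.toList.count '}')) := by
    simp only [PySem.Str.slice, PySem.Str.rfind, show "}".toList = ['}'] from rfl]
    rw [pvTrim_eq]
  rw [hT]
  set v := mt.toList with hv
  set K := v.count '}' with hK
  have hpos0 : ((PySem.List.enumerate v 0).filter (fun p => p.2 == '}')).map (·.1)
      = (pvPos v).map (fun (i : Nat) => (i : Int)) := by
    rw [pvPos_eq v 0]
    exact List.map_congr_left (fun i _ => by omega)
  rw [hpos0]
  have hlen : ((pvPos v).map (fun (i : Nat) => (i : Int))).length = K := by
    rw [List.length_map, pvPos_length]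
  have hcnt1 : PySem.Str.count (String.ofList (pvCutEnd v K)) "}" = K := by
    rw [PySem.Str.count, String.toList_ofList, show "}".toList = ['}'] from rfl, pvCountSingle]
    exact pvCutEnd_count v K (le_refl K)
  have hcnt2 : PySem.Str.count (String.ofList (pvCutEnd v K)) "{" = (pvCutEnd v K).count '{' := by
    rw [PySem.Str.count, String.toList_ofList, show "{".toList = ['{'] from rfl, pvCountSingle]
  rw [hcnt1, hcnt2, hlen]
  by_cases hK0 : K = 0
  · rw [if_pos (by simp [hK0]), hK0, pvCutEnd_zero]
    norm_num
  · have hK1 : 1 ≤ K := Nat.one_le_iff_ne_zero.2 hK0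
    rw [if_neg (by simp; omega)]
    have hplen : (pvPos v).length = K := pvPos_length v
    have hplt : (pvPos v).length - 1 < (pvPos v).length := by omega
    -- the '[-1]' lookup yields the last '}' position
    have hneg1 : PySem.List.pyGetD ((pvPos v).map (fun (i : Nat) => (i : Int))) (-1) 0
        = ((pvPos v)[(pvPos v).length - 1]'hplt : Int) := by
      rw [pvGetNegOne _ _ (by rw [hlen]; omega)]
      have hKlt : ((pvPos v).map (fun (i : Nat) => (i : Int))).length - 1
          < ((pvPos v).map (fun (i : Nat) => (i : Int))).length := by
        rw [hlen]; omega
      rw [List.getElem?_eq_getElem hKlt, Option.getD_some, List.getElem_map]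
      simp
    rw [hneg1]
    -- the '{'-count B computes equals the '{'-count of the trimmed text
    have hopens : PySem.Str.count
        (PySem.Str.slice mt none (some ((pvPos v)[(pvPos v).length - 1]'hplt : Int))) "{"
        = (pvCutEnd v K).count '{' := by
      simp only [PySem.Str.slice, PySem.Chars.slice_eq_listSlice]
      rw [PySem.List.slice_to _ (by omega), Int.toNat_natCast,
        PySem.Str.count, String.toList_ofList, show "{".toList = ['{'] from rfl, pvCountSingle]
      rw [pvOpens v (by omega)]
    rw [hopens]
    set O := (pvCutEnd v K).count '{' with hO
    -- reduce A's loop to an iterate of the one-step trim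
    have habs : |(K : Int) - (O : Int)| = (((K : Int) - (O : Int)).natAbs : Int) :=
      Int.abs_eq_natAbs _
    rw [habs]
    set n := ((K : Int) - (O : Int)).natAbs with hn
    rw [PySem.List.pyRange_zero_natCast, pvFoldlConst, List.length_map, List.length_range,
      pvIterS, pvIter]
    by_cases hm : 0 < (K : Int) - ((n : Nat) : Int)
    · rw [if_pos hm]
      have hi0 : (0 : Int) ≤ (K : Int) - (n : Int) - 1 := by omega
      have hi1 : (K : Int) - (n : Int) - 1 < (((pvPos v).map (fun (i : Nat) => (i : Int))).length : Int) := by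
        rw [hlen]; omega
      rw [PySem.List.pyGetD_eq_getElem _ _ hi0 hi1, List.getElem_map]
      have hj : ((K : Int) - (n : Int) - 1).toNat < (pvPos v).length := by
        rw [hplen]; omega
      have htn : ((((pvPos v)[((K : Int) - (n : Int) - 1).toNat]'hj : Nat) : Int) + 1).toNat
          = (pvPos v)[((K : Int) - (n : Int) - 1).toNat]'hj + 1 := by omega
      have hidx : ((K : Int) - (n : Int) - 1).toNat + 1 = K - n := by omega
      simp only [PySem.Str.slice, PySem.Chars.slice_eq_listSlice]
      rw [PySem.List.slice_to _ (by omega), htn, pvPos_take v _ hj, hidx]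
    · rw [if_neg hm]
      have h0 : K - n = 0 := by omega
      rw [h0, pvCutEnd_zero]

-- repeated-separator epilogue: ''.join(t.split(sep)) = t.replace(sep, '') and len(t.split(sep)) = t.count(sep) + 1
theorem pvRepAcc (old new_ : List Char) : ∀ (f : Nat) (l acc : List Char),
    PySem.Chars.replace.go old new_ f l acc = acc.reverse ++ PySem.Chars.replace.go old new_ f l [] := by
  intro f
  induction f with
  | zero => intro l acc; simp [PySem.Chars.replace.go]
  | succ f ih =>
    intro l acc
    cases l with
    | nil => simp [PySem.Chars.replace.go]
    | cons c t =>
      simp only [PySem.Chars.replace.go]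
      by_cases hp : old.isPrefixOf (c :: t) = true
      · rw [if_pos hp, if_pos hp, ih _ (new_.reverse ++ acc), ih _ (new_.reverse ++ [])]
        simp
      · rw [if_neg hp, if_neg hp, ih _ (c :: acc), ih _ [c]]
        simp

theorem pvSplitGoLen (sep : List Char) (hsep : sep ≠ []) :
    ∀ (f1 : Nat) (l cur : List Char) (acc : List (List Char)) (f2 : Nat),
      l.length ≤ f1 → l.length ≤ f2 →
      (PySem.Chars.splitOn.go sep f1 l cur acc).length = acc.length + 1 + PySem.Chars.count.go sep f2 l 0 := by
  intro f1
  induction f1 with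
  | zero =>
    intro l cur acc f2 h1 _
    have : l = [] := List.eq_nil_of_length_eq_zero (Nat.le_zero.1 h1)
    subst this
    cases f2 <;> simp [PySem.Chars.splitOn.go, PySem.Chars.count.go]
  | succ f1 ih =>
    intro l cur acc f2 h1 h2
    cases l with
    | nil => cases f2 <;> simp [PySem.Chars.splitOn.go, PySem.Chars.count.go]
    | cons c t =>
      cases f2 with
      | zero => simp at h2
      | succ g =>
        simp only [PySem.Chars.splitOn.go, PySem.Chars.count.go]
        by_cases hp : sep.isPrefixOf (c :: t) = true
        · rw [if_pos hp, if_pos hp]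
          have hs1 : 1 ≤ sep.length := by cases sep; simp at hsep; simp
          have hlen : ((c :: t).drop sep.length).length ≤ f1 := by
            simp only [List.length_drop, List.length_cons]
            simp only [List.length_cons] at h1
            omega
          have hlen2 : ((c :: t).drop sep.length).length ≤ g := by
            simp only [List.length_drop, List.length_cons]
            simp only [List.length_cons] at h2
            omega
          rw [ih _ [] (cur.reverse :: acc) g hlen hlen2,
            pvCountGoAcc sep g ((c :: t).drop sep.length) (0 + 1)]
          simp
          omega
        · rw [if_neg hp, if_neg hp]
          exact ih t (c :: cur) acc g (by simpa using h1) (by simpa using h2)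

theorem pvSplitGoFlatten (sep : List Char) (hsep : sep ≠ []) :
    ∀ (f1 : Nat) (l cur : List Char) (acc : List (List Char)) (f2 : Nat),
      l.length ≤ f1 → l.length ≤ f2 →
      (PySem.Chars.splitOn.go sep f1 l cur acc).flatten
        = acc.reverse.flatten ++ cur.reverse ++ PySem.Chars.replace.go sep [] f2 l [] := by
  intro f1
  induction f1 with
  | zero =>
    intro l cur acc f2 h1 _
    have : l = [] := List.eq_nil_of_length_eq_zero (Nat.le_zero.1 h1)
    subst this
    cases f2 <;> simp [PySem.Chars.splitOn.go, PySem.Chars.replace.go]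
  | succ f1 ih =>
    intro l cur acc f2 h1 h2
    cases l with
    | nil => cases f2 <;> simp [PySem.Chars.splitOn.go, PySem.Chars.replace.go]
    | cons c t =>
      cases f2 with
      | zero => simp at h2
      | succ g =>
        simp only [PySem.Chars.splitOn.go, PySem.Chars.replace.go]
        by_cases hp : sep.isPrefixOf (c :: t) = true
        · rw [if_pos hp, if_pos hp]
          have hs1 : 1 ≤ sep.length := by cases sep; simp at hsep; simp
          have hlen : ((c :: t).drop sep.length).length ≤ f1 := by
            simp only [List.length_drop, List.length_cons]
            simp only [List.length_cons] at h1
            omega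
          have hlen2 : ((c :: t).drop sep.length).length ≤ g := by
            simp only [List.length_drop, List.length_cons]
            simp only [List.length_cons] at h2
            omega
          rw [ih _ [] (cur.reverse :: acc) g hlen hlen2]
          simp
        · rw [if_neg hp, if_neg hp]
          rw [ih t (c :: cur) acc g (by simpa using h1) (by simpa using h2),
            pvRepAcc sep [] g t [c]]
          simp

theorem pvIntercalateNil (l : List (List Char)) : List.intercalate [] l = l.flatten := by
  induction l with
  | nil => rfl
  | cons a t ih =>
    cases t with
    | nil => simp [List.intercalate]
    | cons b t2 =>
      simp only [List.intercalate] at ih ⊢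
      simp only [List.intersperse] at ih ⊢
      simp [ih]

theorem pvEpiJoin (t : String) :
    PySem.Str.join "" ((PySem.Str.split? t "<ST>").getD []) = PySem.Str.replace t "<ST>" "" := by
  have hne : ¬ (("<ST>".toList).isEmpty = true) := by decide
  simp only [PySem.Str.split?, PySem.Chars.split?, if_neg hne, Option.map_some, Option.getD_some,
    PySem.Str.join, PySem.Str.replace, PySem.Chars.join, PySem.Chars.replace, if_neg hne,
    List.map_map]
  have hid : (PySem.Chars.splitOn t.toList "<ST>".toList).map (String.toList ∘ String.ofList)
      = PySem.Chars.splitOn t.toList "<ST>".toList := by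
    simp [Function.comp_def]
  rw [hid, show ("".toList : List Char) = [] from rfl, pvIntercalateNil]
  rw [PySem.Chars.splitOn,
    pvSplitGoFlatten ("<ST>".toList) (by decide) (t.toList.length + 1) t.toList [] [] t.toList.length
      (by omega) (le_refl _)]
  simp

theorem pvEpiLen (t : String) :
    (((PySem.Str.split? t "<ST>").getD []).length : Int) = (PySem.Str.count t "<ST>" : Int) + 1 := by
  have hne : ¬ (("<ST>".toList).isEmpty = true) := by decide
  simp only [PySem.Str.split?, PySem.Chars.split?, if_neg hne, Option.map_some, Option.getD_some,
    PySem.Str.count, PySem.Chars.count, if_neg hne, List.length_map]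
  rw [PySem.Chars.splitOn,
    pvSplitGoLen ("<ST>".toList) (by decide) (t.toList.length + 1) t.toList [] [] t.toList.length
      (by omega) (le_refl _)]
  simp only [List.length_nil]
  push_cast
  omega

-- ===== VERDICT (by name: the statement is the Claim_ definition above) =====
theorem get_method_text_spec : Claim_equal_get_method_text := by
  unfold Claim_equal_get_method_text
  intro codelines startpos endpos startline endline last_endline_index _
  unfold Spec_get_method_text
  cases startpos with
  | none => rfl
  | some sp =>
    cases last_endline_index with
    | none =>
      simp only [get_method_text, get_method_text_alt]
      rw [pvMidEq, pvEpiJoin, pvEpiLen]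
    | some l0 =>
      simp only [get_method_text, get_method_text_alt]
      rw [pvAdjEq, pvMidEq, pvEpiJoin, pvEpiLen]
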